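-- pv_equiv track=rewrite | github.com/mobarski/morty | src/asm1c.py | strip_labels
-- ===== SOURCE A (Python) =====
-- def strip_labels(tokens):
-- 	labels = {}
-- 	out = []
-- 	for t in tokens:
-- 		if t[-1]==':':
-- 			name = t[:-1]
-- 			labels[name] = len(out)
-- 		else:
-- 			out += [t]
--
-- 	return out, labels
-- ===== SOURCE B (Python) =====
-- def strip_labels(tokens):
--     # Pre_ excludes inputs containing an empty token, on which A raises IndexError (t[-1]).
--     lab = [(i, t) for i, t in enumerate(tokens) if t[-1] == ':']
--     out = [t for t in tokens if t[-1] != ':']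
--     labels = {t[:-1]: i - j for j, (i, t) in enumerate(lab)}
--     return out, labels
-- ===== Notes on version B (the rewrite author's own statement) =====
-- stated objective: alternative
-- what changed: B never maintains A's growing output list during label assignment: it collects the enumerated positions of label tokens and computes each label's target by closed-form index arithmetic (global index i minus the number j of labels before it), while the instruction list is a separate filter.
import Mathlib
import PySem

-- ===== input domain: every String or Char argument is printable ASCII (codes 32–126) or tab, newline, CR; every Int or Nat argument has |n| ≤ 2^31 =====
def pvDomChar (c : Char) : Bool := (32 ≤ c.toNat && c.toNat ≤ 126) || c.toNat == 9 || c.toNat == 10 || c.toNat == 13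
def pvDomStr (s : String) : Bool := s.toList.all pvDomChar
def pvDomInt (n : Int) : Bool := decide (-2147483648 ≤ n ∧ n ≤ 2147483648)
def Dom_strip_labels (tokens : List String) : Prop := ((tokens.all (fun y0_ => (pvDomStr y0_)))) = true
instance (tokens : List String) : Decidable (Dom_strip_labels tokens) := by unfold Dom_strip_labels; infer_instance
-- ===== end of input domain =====

-- B replaces A's running output list and len(out) reads by index arithmetic:
-- a label at global index i preceded by j labels sits at position i - j (alternative).

-- ===== PORT A =====
-- loop body of A: state (labels, out); t[-1] == ':' → labels[t[:-1]] = len(out), else out += [t]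
def stripLabelsStepA (st : PySem.Dict String Int × List String) (t : String) :
    PySem.Dict String Int × List String :=
  match PySem.Str.pyGet? t (-1) with
  | some c =>
      if c = ':' then (st.1.insert (PySem.Str.slice t none (some (-1))) (st.2.length : Int), st.2)
      else (st.1, st.2 ++ [t])
  | none => st  -- t[-1] raises IndexError on an empty token; excluded by Pre_

def strip_labels (tokens : List String) : List String × (List (String × Int)) :=
  let st := tokens.foldl stripLabelsStepA (PySem.Dict.empty, [])
  (st.2, st.1.items)

-- ===== PORT B =====
-- Source B: lab = [(i,t) for i,t in enumerate(tokens) if t[-1]==':'];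
--       out = [t for t in tokens if t[-1] != ':'];
--       labels = {t[:-1]: i - j for j,(i,t) in enumerate(lab)}
def strip_labels_alt (tokens : List String) : List String × (List (String × Int)) :=
  let lab := (PySem.List.enumerate tokens).filter
      (fun p => PySem.Str.pyGet? p.2 (-1) == some ':')
  let out := tokens.filter (fun t => !(PySem.Str.pyGet? t (-1) == some ':'))
  let labels := (PySem.List.enumerate lab).foldl
      (fun d q => d.insert (PySem.Str.slice q.2.2 none (some (-1))) (q.2.1 - q.1))
      PySem.Dict.empty
  (out, labels.items)

-- ===== PRECONDITION & SPEC =====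
-- Pre_ excludes inputs containing an empty token: there A raises IndexError at t[-1].
def Pre_strip_labels (tokens : List String) : Prop := ∀ t ∈ tokens, t ≠ ""
instance (tokens : List String) : Decidable (Pre_strip_labels tokens) := by
  unfold Pre_strip_labels; infer_instance
def pvWitness_strip_labels : List String := ["loop:", "inc", "jmp", "loop:"]

def Spec_strip_labels (tokens : List String) (out : List String × (List (String × Int))) : Prop := out = strip_labels_alt tokens
instance (tokens : List String) (out : List String × (List (String × Int))) : Decidable (Spec_strip_labels tokens out) := by unfold Spec_strip_labels; infer_instance

-- ===== CLAIM (what is proved, stated in full; the proofs are below) =====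
def Claim_equal_strip_labels : Prop := ∀ (tokens : List String), Dom_strip_labels tokens → Pre_strip_labels tokens → Spec_strip_labels tokens (strip_labels tokens)

-- ===== LEMMAS AND PROOFS =====

-- Loop invariant: A's fold from (d, out), with ts sitting at global index a after j labels
-- (so out has a - j elements), produces B's enumerate-filter fold from d and out ++ filtered ts.
theorem loop_eq (ts : List String) : ∀ (a j : Int) (d : PySem.Dict String Int)
    (out : List String), (∀ t ∈ ts, t ≠ "") → (out.length : Int) = a - j →
    ts.foldl stripLabelsStepA (d, out) =
      ((PySem.List.enumerate
          ((PySem.List.enumerate ts a).filter (fun p => PySem.Str.pyGet? p.2 (-1) == some ':')) j).foldl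
        (fun d q => d.insert (PySem.Str.slice q.2.2 none (some (-1))) (q.2.1 - q.1)) d,
       out ++ ts.filter (fun t => !(PySem.Str.pyGet? t (-1) == some ':'))) := by
  induction ts with
  | nil => intro a j d out _ _; simp [PySem.List.enumerate_nil]
  | cons t ts ih =>
    intro a j d out hne hlen
    have ht : t ≠ "" := hne t (List.mem_cons_self ..)
    have hts : ∀ u ∈ ts, u ≠ "" := fun u hu => hne u (List.mem_cons_of_mem _ hu)
    have htl : t.toList ≠ [] := by
      rw [Ne, String.toList_eq_nil_iff]; exact ht
    obtain ⟨c, hc⟩ : ∃ c, t.toList.getLast? = some c := by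
      cases h : t.toList.getLast? with
      | none => exact absurd (List.getLast?_eq_none_iff.1 h) htl
      | some c => exact ⟨c, rfl⟩
    have hc2 : PySem.List.pyGet? t.toList (-1) = some c := by
      rw [PySem.List.pyGet?_neg_one]; exact hc
    by_cases hcol : c = ':'
    · -- label token: filter keeps (a, t); insert value a - j = len(out)
      subst hcol
      have hstep : stripLabelsStepA (d, out) t =
          (d.insert (PySem.Str.slice t none (some (-1))) (a - j), out) := by
        simp [stripLabelsStepA, hc2, hlen]
      rw [List.foldl_cons, hstep, ih (a + 1) (j + 1) _ out hts (by omega)]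
      simp [PySem.List.enumerate_cons, hc2]
    · -- instruction token: filter drops it, out grows by one
      have hstep : stripLabelsStepA (d, out) t = (d, out ++ [t]) := by
        simp [stripLabelsStepA, hc2, hcol]
      rw [List.foldl_cons, hstep, ih (a + 1) j d (out ++ [t]) hts (by simp; omega)]
      simp [PySem.List.enumerate_cons, hc2, hcol]

-- ===== VERDICT (by name: the statement is the Claim_ definition above) =====
theorem strip_labels_spec : Claim_equal_strip_labels := by
  intro tokens _ hpre
  unfold Spec_strip_labels
  have h := loop_eq tokens 0 0 PySem.Dict.empty [] hpre (by simp)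
  simp only [List.nil_append] at h
  simp only [strip_labels, strip_labels_alt, h]
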